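-- pv_equiv track=rewrite | github.com/DunDunDunDone/Weird-Chess | Chess_main_copy.py | MOT_Gen
-- ===== SOURCE A (Python) =====
-- def MOT_Gen(size, cur_n = 1, cur_t = [[], []]):
--     """Takes size of MOT, number to be added, and the current"""
--     if cur_n > size: # We're Done!
--         return [cur_t]
--     if len(cur_t[0]) == size: # If top row is completed, call again with bigger bottom row
--         return MOT_Gen(size, cur_n+1, [cur_t[0], cur_t[1]+[cur_n, cur_n]])
--     elif len(cur_t[0])+1 == size: # One away from completion of the top row
--         if len(cur_t[1])+1 == size: # One away from bottom row completion?
--             return MOT_Gen(size, cur_n+1, [cur_t[0]+[cur_n], cur_t[1]+[cur_n]])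
--         else:
--             return (MOT_Gen(size, cur_n+1, [cur_t[0], cur_t[1]+[cur_n, cur_n]])
--                     + MOT_Gen(size, cur_n+1, [cur_t[0]+[cur_n], cur_t[1]+[cur_n]]))
--     elif len(cur_t[0])+2 <= size:
--         if len(cur_t[0]) == len(cur_t[1]):
--             return (MOT_Gen(size, cur_n+1, [cur_t[0]+[cur_n, cur_n], cur_t[1]])
--                     + MOT_Gen(size, cur_n+1, [cur_t[0]+[cur_n], cur_t[1]+[cur_n]]))
--         elif len(cur_t[0]) >= len(cur_t[1])+2:
--             return (MOT_Gen(size, cur_n+1, [cur_t[0]+[cur_n, cur_n], cur_t[1]])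
--                     + MOT_Gen(size, cur_n+1, [cur_t[0], cur_t[1]+[cur_n, cur_n]])
--                     + MOT_Gen(size, cur_n+1, [cur_t[0]+[cur_n], cur_t[1]+[cur_n]]))
-- ===== SOURCE B (Python) =====
-- def MOT_Gen(size, cur_n = 1, cur_t = [[], []]):
--     """Takes size of MOT, number to be added, and the current"""
--     frontier = [cur_t]
--     n = cur_n
--     while n <= size:
--         nxt = []
--         for t in frontier:
--             t0, t1 = t[0], t[1]
--             if len(t0) == size:
--                 nxt.append([t0, t1 + [n, n]])
--             elif len(t0) + 1 == size:
--                 if len(t1) + 1 == size: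
--                     nxt.append([t0 + [n], t1 + [n]])
--                 else:
--                     nxt.append([t0, t1 + [n, n]])
--                     nxt.append([t0 + [n], t1 + [n]])
--             elif len(t0) + 2 <= size:
--                 if len(t0) == len(t1):
--                     nxt.append([t0 + [n, n], t1])
--                     nxt.append([t0 + [n], t1 + [n]])
--                 elif len(t0) >= len(t1) + 2:
--                     nxt.append([t0 + [n, n], t1])
--                     nxt.append([t0, t1 + [n, n]])
--                     nxt.append([t0 + [n], t1 + [n]])
--         frontier = nxt
--         n += 1
--     return frontier
-- ===== Notes on version B (the rewrite author's own statement) =====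
-- stated objective: alternative
-- what changed: Replaced A's recursive DFS (concatenating recursive-call results) by an iterative breadth-first loop that expands a whole frontier of partial tableaux once per number n; since every completed tableau lies at the same depth, the final frontier equals A's concatenation order.
-- outside the precondition, e.g. on MOT_Gen(-1, -1, [[], [0]]): A returns None, B returns []
import Mathlib
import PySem

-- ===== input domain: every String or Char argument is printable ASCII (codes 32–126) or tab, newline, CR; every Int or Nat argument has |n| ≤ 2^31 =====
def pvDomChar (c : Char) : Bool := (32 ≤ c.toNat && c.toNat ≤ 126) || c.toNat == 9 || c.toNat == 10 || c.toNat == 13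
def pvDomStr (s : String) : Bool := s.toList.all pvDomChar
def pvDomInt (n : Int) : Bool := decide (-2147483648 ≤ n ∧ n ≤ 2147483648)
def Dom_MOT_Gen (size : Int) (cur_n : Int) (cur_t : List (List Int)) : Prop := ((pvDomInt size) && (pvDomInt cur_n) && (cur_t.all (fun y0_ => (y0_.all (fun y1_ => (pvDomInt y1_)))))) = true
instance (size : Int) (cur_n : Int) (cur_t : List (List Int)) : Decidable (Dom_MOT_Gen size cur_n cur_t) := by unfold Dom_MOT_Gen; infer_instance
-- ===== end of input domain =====

-- B replaces A's recursive DFS by an iterative level-by-level frontier expansion (all leaves lie at the same depth, so the orders agree); objective: alternative decomposition.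


-- ===== PORT A =====
-- termination measure lemma for both ports' loops
lemma pvMeasureLt {size n : Int} (h : ¬ n > size) : (size + 1 - (n + 1)).toNat < (size + 1 - n).toNat := by omega

-- literal port of A's recursion; the two [] arms are Python's fall-through `return None` (excluded by Pre_)
def MOT_Gen (size : Int) (cur_n : Int) (cur_t : List (List Int)) : List (List (List Int)) :=
  if hguard : cur_n > size then [cur_t]
  else
    let t0 := (PySem.List.pyGet? cur_t 0).getD []
    let t1 := (PySem.List.pyGet? cur_t 1).getD []
    if (t0.length : Int) = size then
      MOT_Gen size (cur_n + 1) [t0, t1 ++ [cur_n, cur_n]]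
    else if (t0.length : Int) + 1 = size then
      if (t1.length : Int) + 1 = size then
        MOT_Gen size (cur_n + 1) [t0 ++ [cur_n], t1 ++ [cur_n]]
      else
        MOT_Gen size (cur_n + 1) [t0, t1 ++ [cur_n, cur_n]]
          ++ MOT_Gen size (cur_n + 1) [t0 ++ [cur_n], t1 ++ [cur_n]]
    else if (t0.length : Int) + 2 ≤ size then
      if t0.length = t1.length then
        MOT_Gen size (cur_n + 1) [t0 ++ [cur_n, cur_n], t1]
          ++ MOT_Gen size (cur_n + 1) [t0 ++ [cur_n], t1 ++ [cur_n]]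
      else if (t1.length : Int) + 2 ≤ (t0.length : Int) then
        MOT_Gen size (cur_n + 1) [t0 ++ [cur_n, cur_n], t1]
          ++ MOT_Gen size (cur_n + 1) [t0, t1 ++ [cur_n, cur_n]]
          ++ MOT_Gen size (cur_n + 1) [t0 ++ [cur_n], t1 ++ [cur_n]]
      else []
    else []
  termination_by (size + 1 - cur_n).toNat
  decreasing_by all_goals exact pvMeasureLt hguard

-- ===== PORT B =====
-- successors of one partial tableau for number n (B's loop body)
def stepMOT (size : Int) (n : Int) (t : List (List Int)) : List (List (List Int)) :=
  let t0 := (PySem.List.pyGet? t 0).getD []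
  let t1 := (PySem.List.pyGet? t 1).getD []
  if (t0.length : Int) = size then
    [[t0, t1 ++ [n, n]]]
  else if (t0.length : Int) + 1 = size then
    if (t1.length : Int) + 1 = size then
      [[t0 ++ [n], t1 ++ [n]]]
    else
      [[t0, t1 ++ [n, n]], [t0 ++ [n], t1 ++ [n]]]
  else if (t0.length : Int) + 2 ≤ size then
    if t0.length = t1.length then
      [[t0 ++ [n, n], t1], [t0 ++ [n], t1 ++ [n]]]
    else if (t1.length : Int) + 2 ≤ (t0.length : Int) then
      [[t0 ++ [n, n], t1], [t0, t1 ++ [n, n]], [t0 ++ [n], t1 ++ [n]]]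
    else []
  else []

-- B's while-loop: expand the whole frontier once per number n
def MOTLoop (size : Int) (n : Int) (frontier : List (List (List Int))) : List (List (List Int)) :=
  if hguard : n > size then frontier
  else MOTLoop size (n + 1) (frontier.flatMap (stepMOT size n))
  termination_by (size + 1 - n).toNat
  decreasing_by exact pvMeasureLt hguard

def MOT_Gen_alt (size : Int) (cur_n : Int) (cur_t : List (List Int)) : List (List (List Int)) :=
  MOTLoop size cur_n [cur_t]

-- ===== PRECONDITION & SPEC =====
-- Pre_ is exactly the set of inputs on which the Python A returns a list: outside it A either raises
-- (IndexError on a tableau with < 2 rows, or TypeError concatenating a fall-through None) or returns None,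
-- which is not a value of the declared type.
def Pre_MOT_Gen (size : Int) (cur_n : Int) (cur_t : List (List Int)) : Prop :=
  size < cur_n ∨
    (2 ≤ cur_t.length ∧
      (((cur_t.headD []).length : Int) = size ∨
       ((cur_t.headD []).length : Int) + 1 = size ∨
       (((cur_t.headD []).length : Int) + 2 ≤ size ∧
        (((cur_t.drop 1).headD []).length : Int) ≤ ((cur_t.headD []).length : Int) ∧
        ((((cur_t.headD []).length : Int) - (((cur_t.drop 1).headD []).length : Int)) % 2 = 0 ∨
         size < cur_n + (((cur_t.headD []).length : Int) - (((cur_t.drop 1).headD []).length : Int) - 1) / 2))))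
instance (size : Int) (cur_n : Int) (cur_t : List (List Int)) : Decidable (Pre_MOT_Gen size cur_n cur_t) := by unfold Pre_MOT_Gen; infer_instance

def pvWitness_MOT_Gen : Int × Int × List (List Int) := (2, 1, [[], []])

def Spec_MOT_Gen (size : Int) (cur_n : Int) (cur_t : List (List Int)) (out : List (List (List Int))) : Prop := out = MOT_Gen_alt size cur_n cur_t
instance (size : Int) (cur_n : Int) (cur_t : List (List Int)) (out : List (List (List Int))) : Decidable (Spec_MOT_Gen size cur_n cur_t out) := by unfold Spec_MOT_Gen; infer_instance

-- ===== CLAIM (what is proved, stated in full; the proofs are below) =====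
def Claim_equal_MOT_Gen : Prop := ∀ (size : Int) (cur_n : Int) (cur_t : List (List Int)), Dom_MOT_Gen size cur_n cur_t → Pre_MOT_Gen size cur_n cur_t → Spec_MOT_Gen size cur_n cur_t (MOT_Gen size cur_n cur_t)

-- ===== LEMMAS AND PROOFS =====

lemma MOTLoop_gt {size n : Int} (h : n > size) (f : List (List (List Int))) :
    MOTLoop size n f = f := by
  rw [MOTLoop]; simp [h]

lemma MOTLoop_le {size n : Int} (h : ¬ n > size) (f : List (List (List Int))) :
    MOTLoop size n f = MOTLoop size (n + 1) (f.flatMap (stepMOT size n)) := by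
  rw [MOTLoop]; simp [h]

lemma MOTLoop_append (k : Nat) : ∀ (size n : Int) (xs ys : List (List (List Int))),
    (size + 1 - n).toNat ≤ k →
    MOTLoop size n (xs ++ ys) = MOTLoop size n xs ++ MOTLoop size n ys := by
  induction k with
  | zero =>
    intro size n xs ys hk
    have h : n > size := by omega
    simp [MOTLoop_gt h]
  | succ k ih =>
    intro size n xs ys hk
    by_cases h : n > size
    · simp [MOTLoop_gt h]
    · rw [MOTLoop_le h, MOTLoop_le h xs, MOTLoop_le h ys, List.flatMap_append]
      exact ih size (n + 1) _ _ (by omega)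

lemma MOT_main (k : Nat) : ∀ (size n : Int) (t : List (List Int)),
    (size + 1 - n).toNat ≤ k → Pre_MOT_Gen size n t →
    MOT_Gen size n t = MOTLoop size n [t] := by
  induction k with
  | zero =>
    intro size n t hk _
    have h : n > size := by omega
    rw [MOT_Gen]
    simp [h, MOTLoop_gt h]
  | succ k ih =>
    intro size n t hk hpre
    by_cases h : n > size
    · rw [MOT_Gen]; simp [h, MOTLoop_gt h]
    · have hlen : 2 ≤ t.length := by
        rcases hpre with h1 | ⟨h2, _⟩
        · omega
        · exact h2
      obtain ⟨t0, t1, rest, rfl⟩ : ∃ t0 t1 rest, t = t0 :: t1 :: rest := by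
        match t, hlen with
        | t0 :: t1 :: rest, _ => exact ⟨t0, t1, rest, rfl⟩
      simp only [Pre_MOT_Gen, List.headD, List.drop] at hpre
      have hget0 : (PySem.List.pyGet? (t0 :: t1 :: rest) (0 : Int)).getD [] = t0 := by
        simp [PySem.List.pyGet?_zero_cons]
      have hget1 : (PySem.List.pyGet? (t0 :: t1 :: rest) (1 : Int)).getD [] = t1 := by
        have h1 := PySem.List.pyGet?_ofNat (xs := t0 :: t1 :: rest) (n := 1) (by simp)
        simp only [Nat.cast_one] at h1
        rw [h1]
        rfl

      rw [MOT_Gen, MOTLoop_le h]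
      simp only [h, dite_false, List.flatMap_cons, List.flatMap_nil, List.append_nil,
        stepMOT, hget0, hget1]
      set a : Int := (t0.length : Int) with ha
      set b : Int := (t1.length : Int) with hb
      by_cases c1 : a = size
      · simp only [if_pos c1]
        exact ih size (n + 1) _ (by omega) (by simp [Pre_MOT_Gen, ← ha]; omega)
      · by_cases c2 : a + 1 = size
        · by_cases c3 : b + 1 = size
          · simp only [if_neg c1, if_pos c2, if_pos c3]
            exact ih size (n + 1) _ (by omega) (by simp [Pre_MOT_Gen, ← ha]; omega)
          · simp only [if_neg c1, if_pos c2, if_neg c3]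
            have hsplit : ([[t0, t1 ++ [n, n]], [t0 ++ [n], t1 ++ [n]]] : List (List (List Int)))
                = [[t0, t1 ++ [n, n]]] ++ [[t0 ++ [n], t1 ++ [n]]] := by simp
            rw [hsplit, MOTLoop_append k size (n + 1) _ _ (by omega)]
            rw [← ih size (n + 1) _ (by omega) (by simp [Pre_MOT_Gen, ← ha]; omega),
                ← ih size (n + 1) _ (by omega) (by simp [Pre_MOT_Gen, ← ha]; omega)]
        · have hrest : a + 2 ≤ size ∧ b ≤ a ∧ ((a - b) % 2 = 0 ∨ size < n + (a - b - 1) / 2) := by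
            rcases hpre with h1 | ⟨_, h3 | h3 | h3⟩
            · omega
            · exact absurd h3 c1
            · exact absurd h3 c2
            · exact h3
          obtain ⟨hc3, hba, hpar⟩ := hrest
          simp only [if_neg c1, if_neg c2, if_pos hc3]
          by_cases c4 : t0.length = t1.length
          · simp only [if_pos c4]
            have hab : a = b := by simp [ha, hb, c4]
            have hsplit : ([[t0 ++ [n, n], t1], [t0 ++ [n], t1 ++ [n]]] : List (List (List Int)))
                = [[t0 ++ [n, n], t1]] ++ [[t0 ++ [n], t1 ++ [n]]] := by simp
            rw [hsplit, MOTLoop_append k size (n + 1) _ _ (by omega)]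
            rw [← ih size (n + 1) _ (by omega) (by simp [Pre_MOT_Gen, ← ha, ← hb]; omega),
                ← ih size (n + 1) _ (by omega) (by simp [Pre_MOT_Gen, ← ha, ← hb]; omega)]
          · have hab : a ≠ b := by
              simp only [ha, hb]
              exact_mod_cast fun hh => c4 (by exact_mod_cast hh)
            have hd : b + 2 ≤ a := by by_contra hc; omega
            simp only [if_neg c4, if_pos hd]
            have hsplit : ([[t0 ++ [n, n], t1], [t0, t1 ++ [n, n]], [t0 ++ [n], t1 ++ [n]]] : List (List (List Int)))
                = [[t0 ++ [n, n], t1]] ++ ([[t0, t1 ++ [n, n]]] ++ [[t0 ++ [n], t1 ++ [n]]]) := by simp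
            rw [hsplit, MOTLoop_append k size (n + 1) _ _ (by omega),
                MOTLoop_append k size (n + 1) _ _ (by omega)]
            rw [← ih size (n + 1) _ (by omega) (by simp [Pre_MOT_Gen, ← ha, ← hb]; omega),
                ← ih size (n + 1) _ (by omega) (by simp [Pre_MOT_Gen, ← ha, ← hb]; omega),
                ← ih size (n + 1) _ (by omega) (by simp [Pre_MOT_Gen, ← ha, ← hb]; omega)]
            simp [List.append_assoc]

-- ===== VERDICT (by name: the statement is the Claim_ definition above) =====
theorem MOT_Gen_spec : Claim_equal_MOT_Gen := by
  intro size cur_n cur_t _ hpre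
  unfold Spec_MOT_Gen MOT_Gen_alt
  exact MOT_main (size + 1 - cur_n).toNat size cur_n cur_t le_rfl hpre
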